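-- pv_equiv track=rewrite | github.com/AnhLM027/PYTHON_CODE_PTIT | K BIT 0.py | get
-- ===== SOURCE A (Python) =====
-- def get(pos, s0, a, C):
--     if pos == 0:
--         return 1 if s0 == 0 else 0
--     res = 0
--     if a[pos]:
--         if pos < a[0] and s0 > 0: res = C[pos-1][s0-1]
--         res += get(pos-1, s0, a, C)
--     else:
--         if s0 > 0: res = get(pos-1, s0-1, a, C)
--     return res
-- ===== SOURCE B (Python) =====
-- def get(pos, s0, a, C):
--     # iterative accumulator loop instead of recursion
--     acc = 0
--     while pos > 0:
--         if a[pos]: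
--             if pos < a[0] and s0 > 0:
--                 acc += C[pos - 1][s0 - 1]
--             pos -= 1
--         else:
--             if s0 <= 0:
--                 return acc
--             s0 -= 1
--             pos -= 1
--     return acc + (1 if s0 == 0 else 0)
-- ===== Notes on version B (the rewrite author's own statement) =====
-- stated objective: simpler
-- what changed: Replaces A's recursive chain with a single iterative while-loop threading an explicit accumulator (the early return of the accumulator replaces the recursion bottoming out when s0 is exhausted at a zero bit).
-- outside the precondition, e.g. on get(-1, 0, [0], []): A returns 0, B returns 1
import Mathlib
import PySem

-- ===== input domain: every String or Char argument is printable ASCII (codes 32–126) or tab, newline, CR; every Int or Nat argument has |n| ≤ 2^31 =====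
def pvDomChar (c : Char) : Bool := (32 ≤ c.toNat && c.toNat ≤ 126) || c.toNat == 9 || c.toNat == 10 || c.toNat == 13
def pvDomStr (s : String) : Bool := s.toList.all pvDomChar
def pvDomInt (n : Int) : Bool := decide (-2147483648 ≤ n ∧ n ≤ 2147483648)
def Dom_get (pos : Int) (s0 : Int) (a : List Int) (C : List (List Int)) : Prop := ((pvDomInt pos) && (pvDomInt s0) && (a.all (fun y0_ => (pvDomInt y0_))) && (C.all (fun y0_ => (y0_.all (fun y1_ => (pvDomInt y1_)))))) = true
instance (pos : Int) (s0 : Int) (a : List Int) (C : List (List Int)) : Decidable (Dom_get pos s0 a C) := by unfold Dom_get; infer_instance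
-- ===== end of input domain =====

-- B replaces A's recursion by a single iterative accumulator loop (objective: simpler/alternative decomposition); same return value wherever A returns.

-- ===== PORT A =====
-- Literal port of A's recursion; the `pos ≤ 0` guard only makes it total
-- (for pos < 0 Python wraps indices and raises or returns an accidental 0; excluded by Pre_get).
def get (pos : Int) (s0 : Int) (a : List Int) (C : List (List Int)) : Int :=
  if _h : pos ≤ 0 then
    if s0 == 0 then 1 else 0
  else
    if (PySem.List.pyGet? a pos).getD 0 ≠ 0 then
      (if pos < (PySem.List.pyGet? a 0).getD 0 ∧ s0 > 0 then
        (PySem.List.pyGet? ((PySem.List.pyGet? C (pos - 1)).getD []) (s0 - 1)).getD 0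
       else 0)
      + get (pos - 1) s0 a C
    else
      if s0 > 0 then get (pos - 1) (s0 - 1) a C else 0
termination_by pos.toNat
decreasing_by all_goals omega

-- ===== PORT B =====
-- the while-loop of Source B, with `acc` threaded as an explicit accumulator
def getAltLoop (pos : Int) (s0 : Int) (acc : Int) (a : List Int) (C : List (List Int)) : Int :=
  if _h : pos > 0 then
    if (PySem.List.pyGet? a pos).getD 0 ≠ 0 then
      getAltLoop (pos - 1) s0
        (if pos < (PySem.List.pyGet? a 0).getD 0 ∧ s0 > 0 then
          acc + (PySem.List.pyGet? ((PySem.List.pyGet? C (pos - 1)).getD []) (s0 - 1)).getD 0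
         else acc) a C
    else
      if s0 ≤ 0 then acc
      else getAltLoop (pos - 1) (s0 - 1) acc a C
  else
    acc + (if s0 == 0 then 1 else 0)
termination_by pos.toNat
decreasing_by all_goals omega

def get_alt (pos : Int) (s0 : Int) (a : List Int) (C : List (List Int)) : Int :=
  getAltLoop pos s0 0 a C

-- ===== PRECONDITION & SPEC =====
-- Pre_get excludes exactly the inputs where Python A raises or diverges (pos < 0: unbounded
-- recursion or an accidental 0 via negative-index wraparound and the early exit; pos >= len(a):
-- IndexError on a[pos]; a C table missing an entry the descent actually reads: IndexError) —
-- in short, it restricts to the natural domain of a bit-position with a binomial table covering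
-- every access the recursion makes.
def Pre_get (pos : Int) (s0 : Int) (a : List Int) (C : List (List Int)) : Prop :=
  0 ≤ pos ∧ (pos = 0 ∨ pos < a.length) ∧
  ∀ i ∈ List.range pos.toNat,
    (a.getD (i + 1) 0 ≠ 0 ∧ ((i : Int) + 1) < a.headD 0 ∧
      0 < s0 - (((a.take (pos.toNat + 1)).drop (i + 2)).count 0 : Int)) →
    (i < C.length ∧ s0 - (((a.take (pos.toNat + 1)).drop (i + 2)).count 0 : Int) ≤ (C.getD i []).length)
instance (pos : Int) (s0 : Int) (a : List Int) (C : List (List Int)) : Decidable (Pre_get pos s0 a C) := by unfold Pre_get; infer_instance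

def pvWitness_get : Int × Int × List Int × List (List Int) :=
  (2, 1, [3, 0, 1], [[1, 1], [1, 2]])

def Spec_get (pos : Int) (s0 : Int) (a : List Int) (C : List (List Int)) (out : Int) : Prop := out = get_alt pos s0 a C
instance (pos : Int) (s0 : Int) (a : List Int) (C : List (List Int)) (out : Int) : Decidable (Spec_get pos s0 a C out) := by unfold Spec_get; infer_instance

-- ===== CLAIM (what is proved, stated in full; the proofs are below) =====
def Claim_equal_get : Prop := ∀ (pos : Int) (s0 : Int) (a : List Int) (C : List (List Int)), Dom_get pos s0 a C → Pre_get pos s0 a C → Spec_get pos s0 a C (get pos s0 a C)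

-- ===== LEMMAS AND PROOFS =====

-- loop invariant: the accumulator version computes acc + (A's recursive value)
theorem getAltLoop_eq (n : ℕ) : ∀ (pos s0 acc : Int) (a : List Int) (C : List (List Int)),
    pos.toNat = n → getAltLoop pos s0 acc a C = acc + get pos s0 a C := by
  induction n using Nat.strong_induction_on with
  | _ n ih =>
    intro pos s0 acc a C hn
    rw [getAltLoop, get.eq_def]
    by_cases hp : pos > 0
    · simp only [hp, dif_pos, not_le.mpr hp, dif_neg, not_false_iff]
      have hlt : (pos - 1).toNat < n := by omega
      by_cases ha : (PySem.List.pyGet? a pos).getD 0 ≠ 0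
      · rw [if_pos ha, if_pos ha, ih _ hlt (pos - 1) s0 _ a C rfl]
        split_ifs <;> ring
      · rw [if_neg ha, if_neg ha]
        by_cases hs : s0 ≤ 0
        · simp [hs, not_lt.mpr hs]
        · rw [if_neg hs, if_pos (by omega : s0 > 0),
              ih _ hlt (pos - 1) (s0 - 1) acc a C rfl]
    · simp [hp, (by omega : pos ≤ 0)]

-- ===== VERDICT (by name: the statement is the Claim_ definition above) =====
theorem get_spec : Claim_equal_get := by
  intro pos s0 a C _ _
  unfold Spec_get get_alt
  rw [getAltLoop_eq pos.toNat pos s0 0 a C rfl]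
  ring
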